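-- pv_equiv track=rewrite | github.com/AliJahan/ROCm-docker-with-controller | scripts/utils/experiment_runner/resource_managers/resource_manager.py | generate_bin_str
-- ===== SOURCE A (Python) =====
-- def generate_bin_str(cu_list):
--     mask = ""
--     for i in range(64,0,-1):
--         if i in cu_list:
--             mask += '1'
--         else:
--             mask += '0'
--     return mask
-- ===== SOURCE B (Python) =====
-- def generate_bin_str(cu_list):
--     n = 0
--     for cu in cu_list:
--         if cu in range(1, 65):
--             n |= 1 << (cu - 1)
--     return format(n, '064b')
-- ===== Notes on version B (the rewrite author's own statement) =====
-- stated objective: faster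
-- what changed: B builds an integer bitmask in one pass over cu_list (setting bit cu-1 for each cu in 1..64) and formats it with format(n, '064b'), instead of scanning cu_list once per each of the 64 positions and concatenating characters.
import Mathlib
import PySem

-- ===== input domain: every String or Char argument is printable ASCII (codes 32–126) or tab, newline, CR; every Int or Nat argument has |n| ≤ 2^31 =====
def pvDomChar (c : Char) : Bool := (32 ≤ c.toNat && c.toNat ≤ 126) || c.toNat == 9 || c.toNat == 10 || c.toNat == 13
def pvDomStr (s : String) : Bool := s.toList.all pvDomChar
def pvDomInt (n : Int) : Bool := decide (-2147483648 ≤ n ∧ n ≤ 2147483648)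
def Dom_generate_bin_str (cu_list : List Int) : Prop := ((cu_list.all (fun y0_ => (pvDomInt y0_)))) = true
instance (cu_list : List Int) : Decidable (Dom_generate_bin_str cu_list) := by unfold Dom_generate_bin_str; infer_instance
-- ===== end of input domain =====

-- B replaces A's 64 membership scans + string concatenation by a single pass building an integer bitmask, then formats it (measured faster).
-- ===== PORT A =====
def generate_bin_str (cu_list : List Int) : String :=
  (PySem.List.pyRange 64 0 (-1)).foldl
    (fun mask i => if cu_list.contains i then mask ++ "1" else mask ++ "0") ""

-- ===== PORT B =====
-- one pass over cu_list builds a Nat bitmask (bit cu-1 set for cu ∈ [1,64]) …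
def pvMask (cu_list : List Int) : Nat :=
  cu_list.foldl
    (fun (n : Nat) (cu : Int) => if 1 ≤ cu ∧ cu ≤ 64 then n ||| (1 <<< (cu - 1).toNat) else n) 0

-- … then format(n, '064b'): the 64 bits of the mask, most significant first
def generate_bin_str_alt (cu_list : List Int) : String :=
  String.ofList ((List.range 64).map (fun k => if (pvMask cu_list).testBit (63 - k) then '1' else '0'))

-- ===== PRECONDITION & SPEC =====
def Spec_generate_bin_str (cu_list : List Int) (out : String) : Prop := out = generate_bin_str_alt cu_list
instance (cu_list : List Int) (out : String) : Decidable (Spec_generate_bin_str cu_list out) := by unfold Spec_generate_bin_str; infer_instance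

-- ===== CLAIM (what is proved, stated in full; the proofs are below) =====
def Claim_equal_generate_bin_str : Prop := ∀ (cu_list : List Int), Dom_generate_bin_str cu_list → Spec_generate_bin_str cu_list (generate_bin_str cu_list)

-- ===== LEMMAS AND PROOFS =====

-- bit j of the accumulated mask: set iff already set or j < 64 and j+1 occurs in the rest
theorem pvMask_foldl_testBit (l : List Int) (n : Nat) (j : Nat) :
    (l.foldl (fun (n : Nat) (cu : Int) => if 1 ≤ cu ∧ cu ≤ 64 then n ||| (1 <<< (cu - 1).toNat) else n) n).testBit j
      = (n.testBit j || (decide (j < 64) && l.contains ((j : Int) + 1))) := by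
  induction l generalizing n with
  | nil => simp
  | cons cu rest ih =>
    simp only [List.foldl_cons, ih, List.contains_cons]
    by_cases h : 1 ≤ cu ∧ cu ≤ 64
    · simp only [if_pos h, Nat.testBit_or, Nat.one_shiftLeft, Nat.testBit_two_pow]
      by_cases hc : cu = (j : Int) + 1
      · have hj : j < 64 := by omega
        have ht : (cu - 1).toNat = j := by omega
        have hb : ((j : Int) + 1 == cu) = true := by simp [hc]
        simp [ht, hj, hb]
      · have ht : ¬(cu.toNat - 1 = j) := by omega
        have hb : ((j : Int) + 1 == cu) = false := by
          simp; omega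
        simp [ht, hb]
    · by_cases hj : j < 64
      · have hb : ((j : Int) + 1 == cu) = false := by
          simp; intro he; apply h; constructor <;> omega
        simp [if_neg h, hb]
      · simp [if_neg h, hj]

theorem pvMask_testBit (cu_list : List Int) (j : Nat) :
    (pvMask cu_list).testBit j = (decide (j < 64) && cu_list.contains ((j : Int) + 1)) := by
  unfold pvMask
  rw [pvMask_foldl_testBit]
  simp

-- A's string-building loop, characterised as a map over the index list
theorem pvA_foldl_toList (is : List Int) (cu_list : List Int) (s : String) :
    ((is.foldl (fun mask i => if cu_list.contains i then mask ++ "1" else mask ++ "0") s).toList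
      = s.toList ++ is.map (fun i => if cu_list.contains i then '1' else '0')) := by
  induction is generalizing s with
  | nil => simp
  | cons i rest ih =>
    simp only [List.foldl_cons, List.map_cons]
    rw [ih]
    split <;> simp

-- range(64, 0, -1) as a closed list of descending indices
theorem pvRange_desc :
    PySem.List.pyRange 64 0 (-1) = (List.range 64).map (fun (k : Nat) => (64 : Int) - (k : Int)) := by
  decide

-- ===== VERDICT (by name: the statement is the Claim_ definition above) =====
theorem generate_bin_str_spec : Claim_equal_generate_bin_str := by
  intro cu_list _
  show generate_bin_str cu_list = generate_bin_str_alt cu_list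
  have hA : (generate_bin_str cu_list).toList
      = (List.range 64).map (fun (k : Nat) => if cu_list.contains ((64 : Int) - (k : Int)) then '1' else '0') := by
    unfold generate_bin_str
    rw [pvRange_desc, pvA_foldl_toList]
    simp [List.map_map, Function.comp_def]
  apply String.toList_injective
  rw [hA]
  unfold generate_bin_str_alt
  rw [String.toList_ofList]
  apply List.map_congr_left
  intro k hk
  have hk64 : k < 64 := List.mem_range.mp hk
  rw [pvMask_testBit]
  have h1 : (63 - k < 64) := by omega
  have h2 : ((63 - k : Nat) : Int) + 1 = (64 : Int) - k := by omega
  simp [h1, h2]
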